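-- pv_equiv track=rewrite | github.com/queelius/computational-explorations | src/ramsey_attacks.py | kneser_graph_edges
-- ===== SOURCE A (Python) =====
-- from itertools import combinations, product
-- from typing import Dict, List, Optional, Set, Tuple
--
-- def kneser_graph_edges(n: int, k: int) -> List[Tuple[frozenset, frozenset]]:
--     """
--     Edges of the Kneser graph KG(n,k): vertices are k-subsets of [n],
--     two vertices are adjacent iff the subsets are disjoint.
--
--     Lovász (1978) proved chi(KG(n,k)) = n - 2k + 2 for n >= 2k.
--     """
--     vertices = [frozenset(s) for s in combinations(range(n), k)]
--     edges = []
--     for i in range(len(vertices)):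
--         for j in range(i + 1, len(vertices)):
--             if not vertices[i] & vertices[j]:  # disjoint
--                 edges.append((vertices[i], vertices[j]))
--     return edges
-- ===== SOURCE B (Python) =====
-- from itertools import combinations
--
-- def kneser_graph_edges(n, k):
--     """Edges of KG(n,k): for each vertex S, pair it with each disjoint k-subset
--     T of its complement that comes later in lexicographic order."""
--     fs = {t: frozenset(t) for t in combinations(range(n), k)}
--     edges = []
--     for s in fs:
--         members = set(s)
--         comp = [x for x in range(n) if x not in members]
--         for t in combinations(comp, k):
--             if t > s:
--                 edges.append((fs[s], fs[t]))
--     return edges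
-- ===== Notes on version B (the rewrite author's own statement) =====
-- stated objective: alternative
-- what changed: Instead of testing every pair of k-subsets for intersection, B enumerates for each vertex only the k-subsets of its complement (via combinations of the complement) that come later lexicographically, so non-disjoint pairs are never generated.
import Mathlib
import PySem

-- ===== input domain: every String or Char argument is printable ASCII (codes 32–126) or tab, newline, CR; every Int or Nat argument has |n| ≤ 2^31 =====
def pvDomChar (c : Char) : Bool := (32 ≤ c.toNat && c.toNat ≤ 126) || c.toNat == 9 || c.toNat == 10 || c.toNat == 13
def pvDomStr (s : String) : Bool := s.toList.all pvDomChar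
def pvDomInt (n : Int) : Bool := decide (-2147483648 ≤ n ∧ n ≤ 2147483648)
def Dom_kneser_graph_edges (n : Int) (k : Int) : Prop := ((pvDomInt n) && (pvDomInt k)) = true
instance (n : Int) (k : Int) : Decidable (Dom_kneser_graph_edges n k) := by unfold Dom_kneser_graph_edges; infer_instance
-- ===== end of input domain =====

-- B replaces A's all-pairs scan (every pair of k-subsets tested for intersection) by
-- enumerating, for each vertex, only the k-subsets of its complement that come later
-- in lexicographic order; frozensets are ported as the sorted lists of their elements.

-- shared helper: itertools.combinations(xs, k) for a duplicate-free list xs,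
-- in Python's lexicographic emission order (both Pythons call this library routine)
def combos : Nat → List Int → List (List Int)
  | 0, _ => [[]]
  | _ + 1, [] => []
  | k + 1, x :: xs =>
      -- itertools.combinations emits nothing when r exceeds the pool size ('if r > n: return');
      -- this short-circuit mirrors that and does not change the value (see combos_cons below)
      if xs.length < k then combos (k + 1) xs
      else ((combos k xs).map (fun t => x :: t)) ++ combos (k + 1) xs

-- ===== PORT A =====
-- inner loop of A: 'for j in range(i+1, len(vertices)): if not vertices[i] & vertices[j]: edges.append(...)'
def pairsA (v : List Int) : List (List Int) → List (List Int × List Int)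
  | [] => []
  | w :: rest =>
      if v.filter (fun x => w.contains x) = [] then (v, w) :: pairsA v rest
      else pairsA v rest

-- outer loop of A over i, realised as recursion over the suffix of vertices after index i
def loopA : List (List Int) → List (List Int × List Int)
  | [] => []
  | v :: rest => pairsA v rest ++ loopA rest

def kneser_graph_edges (n : Int) (k : Int) : List (List Int × List Int) :=
  loopA (combos k.toNat (PySem.List.pyRange 0 n 1))

-- ===== PORT B =====
-- Python tuple comparison 't > s' on int tuples, i.e. lexLt s t
def lexLt : List Int → List Int → Bool
  | [], [] => false
  | [], _ :: _ => true
  | _ :: _, [] => false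
  | a :: as_, b :: bs => if a < b then true else if b < a then false else lexLt as_ bs

def kneser_graph_edges_alt (n : Int) (k : Int) : List (List Int × List Int) :=
  (combos k.toNat (PySem.List.pyRange 0 n 1)).foldl
    (fun acc s =>
      let comp := (PySem.List.pyRange 0 n 1).filter (fun x => !s.contains x)
      acc ++ (combos k.toNat comp).foldl
        (fun acc2 t => if lexLt s t then acc2 ++ [(s, t)] else acc2) [])
    []

-- ===== PRECONDITION & SPEC =====
-- Pre_ excludes k < 0, on which Python's combinations raises ValueError in both programs.
def Pre_kneser_graph_edges (n : Int) (k : Int) : Prop := 0 ≤ k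
instance (n : Int) (k : Int) : Decidable (Pre_kneser_graph_edges n k) := by unfold Pre_kneser_graph_edges; infer_instance
def pvWitness_kneser_graph_edges : Int × Int := (5, 2)

def Spec_kneser_graph_edges (n : Int) (k : Int) (out : List (List Int × List Int)) : Prop := out = kneser_graph_edges_alt n k
instance (n : Int) (k : Int) (out : List (List Int × List Int)) : Decidable (Spec_kneser_graph_edges n k out) := by unfold Spec_kneser_graph_edges; infer_instance

-- ===== CLAIM (what is proved, stated in full; the proofs are below) =====
def Claim_equal_kneser_graph_edges : Prop := ∀ (n : Int) (k : Int), Dom_kneser_graph_edges n k → Pre_kneser_graph_edges n k → Spec_kneser_graph_edges n k (kneser_graph_edges n k)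

-- ===== LEMMAS AND PROOFS =====

-- disjointness test of A, as a Bool
def disjA (s t : List Int) : Bool := decide (s.filter (fun x => t.contains x) = [])

theorem disj_eq (s t : List Int) : t.all (fun x => !s.contains x) = disjA s t := by
  have h : (t.all (fun x => !s.contains x) = true) ↔ (disjA s t = true) := by
    simp [disjA, List.filter_eq_nil_iff, List.all_eq_true]
    constructor
    · intro h x hx hxt; exact h x hxt hx
    · intro h x hx hxs; exact h x hxs hx
  exact Bool.coe_iff_coe.mp h

theorem combos_nil_of_lt : ∀ (xs : List Int) (k : Nat), xs.length < k → combos k xs = [] := by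
  intro xs
  induction xs with
  | nil => intro k hk; cases k with
    | zero => omega
    | succ k => rfl
  | cons x xs ih =>
    intro k hk
    cases k with
    | zero => omega
    | succ k =>
      have h1 : xs.length < k := by simpa using hk
      rw [combos, if_pos h1]
      exact ih (k + 1) (by omega)

theorem combos_cons (k : Nat) (x : Int) (xs : List Int) :
    combos (k + 1) (x :: xs) = ((combos k xs).map (fun t => x :: t)) ++ combos (k + 1) xs := by
  by_cases h : xs.length < k
  · rw [combos, if_pos h, combos_nil_of_lt xs k h, List.map_nil, List.nil_append]
  · rw [combos, if_neg h]

theorem combos_filter (xs : List Int) (p : Int → Bool) :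
    ∀ k, combos k (xs.filter p) = (combos k xs).filter (fun t => t.all p) := by
  induction xs with
  | nil => intro k; cases k <;> simp [combos]
  | cons x xs ih =>
    intro k
    cases k with
    | zero => simp [combos]
    | succ k =>
      by_cases hp : p x = true
      · rw [List.filter_cons, if_pos hp, combos_cons, ih k, ih (k+1), combos_cons,
          List.filter_append, List.filter_map]
        congr 1
        apply congrArg
        apply List.filter_congr
        intro t _
        simp [hp]
      · rw [List.filter_cons, if_neg hp, ih (k+1), combos_cons, List.filter_append,
          List.filter_map]
        have h0 : List.filter ((fun t => t.all p) ∘ fun t => x :: t) (combos k xs) = [] :=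
          List.filter_eq_nil_iff.mpr (fun t _ => by simp [hp])
        rw [h0, List.map_nil, List.nil_append]

theorem lexLt_irrefl (s : List Int) : lexLt s s = false := by
  induction s with
  | nil => rfl
  | cons a as_ ih => simp [lexLt, ih]

theorem lexLt_asymm (a b : List Int) (h : lexLt a b = true) : lexLt b a = false := by
  induction a generalizing b with
  | nil => cases b with
    | nil => exact absurd h (by decide)
    | cons y ys => rfl
  | cons x xs ih =>
    cases b with
    | nil => simp [lexLt] at h
    | cons y ys =>
      simp only [lexLt] at h ⊢
      rcases lt_trichotomy x y with hlt | heq | hgt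
      · simp [hlt, not_lt.mpr hlt.le]
      · subst heq
        simp only [lt_irrefl, if_false] at h ⊢
        exact ih ys h
      · simp [hgt, not_lt.mpr hgt.le] at h

theorem lexLt_cons_same (x : Int) (a b : List Int) : lexLt (x :: a) (x :: b) = lexLt a b := by
  simp [lexLt]

theorem mem_combos_head (xs : List Int) : ∀ (k : Nat) (t : List Int),
    t ∈ combos (k + 1) xs → ∃ y t', t = y :: t' ∧ y ∈ xs := by
  induction xs with
  | nil => intro k t ht; simp [combos] at ht
  | cons x xs ih =>
    intro k t ht
    simp only [combos_cons, List.mem_append, List.mem_map] at ht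
    rcases ht with ⟨a, _, rfl⟩ | ht
    · exact ⟨x, a, rfl, by simp⟩
    · obtain ⟨y, t', rfl, hy⟩ := ih k t ht
      exact ⟨y, t', rfl, by simp [hy]⟩

theorem combos_sorted (xs : List Int) (hxs : xs.Pairwise (· < ·)) :
    ∀ k, (combos k xs).Pairwise (fun a b => lexLt a b = true) := by
  induction xs with
  | nil => intro k; cases k <;> simp [combos]
  | cons x xs ih =>
    intro k
    have hx : ∀ y ∈ xs, x < y := fun y hy => (List.pairwise_cons.mp hxs).1 y hy
    have hxs' : xs.Pairwise (· < ·) := (List.pairwise_cons.mp hxs).2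
    cases k with
    | zero => simp [combos]
    | succ k =>
      rw [combos_cons, List.pairwise_append]
      refine ⟨?_, ih hxs' (k+1), ?_⟩
      · refine List.Pairwise.map _ ?_ (ih hxs' k)
        intro a b hab
        rwa [lexLt_cons_same]
      · intro a ha t ht
        obtain ⟨a', ha', rfl⟩ := List.mem_map.mp ha
        obtain ⟨y, t', rfl, hy⟩ := mem_combos_head xs k t ht
        simp [lexLt, hx y hy]

theorem pairsA_eq (v : List Int) (l : List (List Int)) :
    pairsA v l = (l.filter (fun t => disjA v t)).map (fun t => (v, t)) := by
  induction l with
  | nil => rfl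
  | cons w rest ih =>
    rw [pairsA, ih, List.filter_cons]
    by_cases h : v.filter (fun x => w.contains x) = []
    · rw [if_pos h, if_pos (by simp only [disjA, decide_eq_true_eq]; exact h), List.map_cons]
    · rw [if_neg h, if_neg (by simp only [disjA, decide_eq_true_eq]; exact h)]

theorem loopA_eq (l : List (List Int)) (hl : l.Pairwise (fun a b => lexLt a b = true)) :
    loopA l = l.flatMap (fun s => (l.filter (fun t => lexLt s t && disjA s t)).map (fun t => (s, t))) := by
  induction l with
  | nil => rfl
  | cons v rest ih =>
    obtain ⟨hv, hrest⟩ := List.pairwise_cons.mp hl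
    rw [loopA, List.flatMap_cons, ih hrest, pairsA_eq]
    congr 1
    · rw [List.filter_cons, if_neg (by simp [lexLt_irrefl])]
      congr 1
      apply List.filter_congr
      intro t ht
      simp [hv t ht]
    · apply List.flatMap_congr
      intro s hs
      rw [List.filter_cons, if_neg (by simp [lexLt_asymm v s (hv s hs)])]

-- ===== VERDICT (by name: the statement is the Claim_ definition above) =====
theorem kneser_graph_edges_spec : Claim_equal_kneser_graph_edges := by
  intro n k _ _
  unfold Spec_kneser_graph_edges kneser_graph_edges kneser_graph_edges_alt
  rw [PySem.List.foldl_append_eq_flatMap, List.nil_append,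
    loopA_eq _ (combos_sorted _ (PySem.List.pairwise_lt_pyRange_one 0 n) k.toNat)]
  apply List.flatMap_congr
  intro s _
  rw [PySem.List.foldl_append_if (fun t => lexLt s t) (fun t => (s, t)), List.nil_append,
    combos_filter, List.filter_filter]
  congr 1
  apply List.filter_congr
  intro t _
  rw [disj_eq]
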